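-- pv_equiv track=rewrite | github.com/Elizabeth1401/ADS-exercises | practice/code/big-o_exercises.py | upper_triangle
-- ===== SOURCE A (Python) =====
-- def upper_triangle(n):
--     # We only count j >= i (upper triangle including diagonal)
--     # Number of ops = n + (n-1) + ... + 1 = n(n+1)/2 → Θ(n^2)
--     ops = 0
--     for i in range(n):
--         for j in range(n):
--             if j < i:            # break out of inner early
--                 continue
--             ops += 1
--     return ops
-- ===== SOURCE B (Python) =====
-- def upper_triangle(n):
--     # Closed form: number of pairs (i, j) with 0 <= i <= j < n is n(n+1)/2.
--     return n * (n + 1) // 2 if n > 0 else 0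
-- ===== Notes on version B (the rewrite author's own statement) =====
-- stated objective: faster
-- what changed: Replaced the doubly nested counting loops with the closed-form triangular number n*(n+1)//2 (0 for non-positive n).
import Mathlib
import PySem

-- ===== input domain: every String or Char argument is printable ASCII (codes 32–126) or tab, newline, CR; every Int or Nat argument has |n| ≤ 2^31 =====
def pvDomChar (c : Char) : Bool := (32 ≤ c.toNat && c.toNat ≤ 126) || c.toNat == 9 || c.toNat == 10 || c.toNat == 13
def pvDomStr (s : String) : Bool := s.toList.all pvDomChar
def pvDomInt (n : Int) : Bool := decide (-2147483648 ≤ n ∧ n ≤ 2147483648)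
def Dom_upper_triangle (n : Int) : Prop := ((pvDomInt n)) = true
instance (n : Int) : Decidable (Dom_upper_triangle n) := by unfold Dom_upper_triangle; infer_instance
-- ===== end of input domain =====

-- B replaces A's doubly nested Θ(n²) counting loops by the closed form n(n+1)//2 (0 for n ≤ 0).

-- ===== PORT A =====
def upper_triangle (n : Int) : Int :=
  (PySem.List.pyRange 0 n 1).foldl (fun ops i =>
    (PySem.List.pyRange 0 n 1).foldl (fun ops j =>
      if j < i then ops else ops + 1) ops) 0

-- ===== PORT B =====
def upper_triangle_alt (n : Int) : Int :=
  if n > 0 then PySem.Int.floordiv (n * (n + 1)) 2 else 0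

-- ===== PRECONDITION & SPEC =====
def Spec_upper_triangle (n : Int) (out : Int) : Prop := out = upper_triangle_alt n
instance (n : Int) (out : Int) : Decidable (Spec_upper_triangle n out) := by unfold Spec_upper_triangle; infer_instance

-- ===== CLAIM (what is proved, stated in full; the proofs are below) =====
def Claim_equal_upper_triangle : Prop := ∀ (n : Int), Dom_upper_triangle n → Spec_upper_triangle n (upper_triangle n)

-- ===== LEMMAS AND PROOFS =====

-- Inner loop: if every element of l is below i, the fold keeps its accumulator.
theorem inner_all_lt (i : Int) (l : List Int) (h : ∀ j ∈ l, j < i) (s : Int) :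
    l.foldl (fun a j => if j < i then a else a + 1) s = s := by
  induction l generalizing s with
  | nil => rfl
  | cons x xs ih =>
    have hx : x < i := h x (List.mem_cons_self)
    simp [List.foldl, hx, ih (fun j hj => h j (List.mem_cons_of_mem _ hj))]

-- Inner loop over range(n) adds n - i to the accumulator (0 ≤ i ≤ n).
theorem inner_count (t : Nat) : ∀ (n i s : Int), 0 ≤ i → i ≤ n → n - i = t →
    (PySem.List.pyRange 0 n 1).foldl (fun a j => if j < i then a else a + 1) s = s + (n - i) := by
  induction t with
  | zero =>
    intro n i s h0 h1 ht
    have hni : n = i := by omega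
    rw [inner_all_lt i _ (fun j hj => by
      have := (PySem.List.mem_pyRange_one).1 hj; omega)]
    omega
  | succ t ih =>
    intro n i s h0 h1 ht
    have hb : (0:Int) ≤ n - 1 := by omega
    have hstep : PySem.List.pyRange 0 n 1 = PySem.List.pyRange 0 (n - 1) 1 ++ [n - 1] := by
      have := PySem.List.pyRange_one_succ_right (a := 0) (b := n - 1) hb
      simpa using this
    rw [hstep, List.foldl_append, ih (n - 1) i s h0 (by omega) (by omega)]
    have hni : ¬ (n - 1 < i) := by omega
    simp [List.foldl, hni]
    omega

-- Shifting a fold's start value by 1 shifts its result by 1, when the body commutes with +1.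
theorem foldl_shift1 (g : Int → Int → Int) (hg : ∀ u x, g (u + 1) x = g u x + 1) :
    ∀ (l : List Int) (u : Int), l.foldl g (u + 1) = l.foldl g u + 1 := by
  intro l
  induction l with
  | nil => intro u; rfl
  | cons x xs ih => intro u; simp only [List.foldl, hg]; exact ih (g u x)

theorem inner_shift (i : Int) (u x : Int) :
    (fun a j => if j < i then a else a + 1) (u + 1) x
      = (fun a j => if j < i then a else a + 1) u x + 1 := by
  by_cases hx : x < i <;> simp [hx]

theorem outer_shift (m : Int) (u i : Int) :
    (fun ops i => (PySem.List.pyRange 0 m 1).foldl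
      (fun ops j => if j < i then ops else ops + 1) ops) (u + 1) i
    = (fun ops i => (PySem.List.pyRange 0 m 1).foldl
      (fun ops j => if j < i then ops else ops + 1) ops) u i + 1 := by
  exact foldl_shift1 _ (inner_shift i) _ u

-- A +1 after every outer-loop iteration is the same as adding the list length at the end.
theorem hshift (m : Int) : ∀ (l : List Int) (s : Int),
    l.foldl (fun ops i => (PySem.List.pyRange 0 m 1).foldl
      (fun ops j => if j < i then ops else ops + 1) ops + 1) s
    = l.foldl (fun ops i => (PySem.List.pyRange 0 m 1).foldl
      (fun ops j => if j < i then ops else ops + 1) ops) s + l.length := by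
  intro l
  induction l with
  | nil => intro s; simp
  | cons x xs ihx =>
    intro s
    simp only [List.foldl, List.length_cons]
    rw [ihx, foldl_shift1 _ (fun u i => outer_shift m u i)]
    push_cast
    omega

-- Outer loop: 2 × the whole nested fold started at s is 2s + n(n+1).
theorem outer_total (t : Nat) : ∀ (n s : Int), 0 ≤ n → n = t →
    2 * ((PySem.List.pyRange 0 n 1).foldl (fun ops i =>
      (PySem.List.pyRange 0 n 1).foldl (fun ops j => if j < i then ops else ops + 1) ops) s)
      = 2 * s + n * (n + 1) := by
  induction t with
  | zero =>
    intro n s h0 ht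
    subst ht
    simp
  | succ t ih =>
    intro n s h0 ht
    have hb : (0:Int) ≤ n - 1 := by omega
    have hstep : PySem.List.pyRange 0 n 1 = PySem.List.pyRange 0 (n - 1) 1 ++ [n - 1] := by
      have := PySem.List.pyRange_one_succ_right (a := 0) (b := n - 1) hb
      simpa using this
    -- over i < n-1 the inner loop may equivalently run over range(n-1), plus one extra hit
    have hcong : (PySem.List.pyRange 0 (n-1) 1).foldl (fun ops i =>
        (PySem.List.pyRange 0 (n-1) 1 ++ [n-1]).foldl (fun ops j => if j < i then ops else ops + 1) ops) s
        = (PySem.List.pyRange 0 (n-1) 1).foldl (fun ops i =>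
        (PySem.List.pyRange 0 (n-1) 1).foldl (fun ops j => if j < i then ops else ops + 1) ops + 1) s := by
      apply PySem.List.foldl_congr_mem
      intro acc i hi
      have hi' := (PySem.List.mem_pyRange_one).1 hi
      rw [← hstep,
          inner_count ((n - i).toNat) n i acc (by omega) (by omega) (by omega),
          inner_count ((n - 1 - i).toNat) (n-1) i acc (by omega) (by omega) (by omega)]
      omega
    rw [hstep, List.foldl_append]
    simp only [List.foldl]
    rw [hcong, hshift, ← hstep, inner_count 1 n (n-1) _ (by omega) (by omega) (by omega)]
    have hlen : ((PySem.List.pyRange 0 (n-1) 1).length : Int) = n - 1 := by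
      rw [PySem.List.length_pyRange_one]; omega
    have hIH := ih (n - 1) s hb (by omega)
    have hx : n * (n + 1) = (n - 1) * ((n - 1) + 1) + 2 * n := by ring
    omega

-- ===== VERDICT (by name: the statement is the Claim_ definition above) =====
theorem upper_triangle_spec : Claim_equal_upper_triangle := by
  intro n _
  unfold Spec_upper_triangle upper_triangle upper_triangle_alt
  by_cases hn : n > 0
  · rw [if_pos hn]
    have h2 := outer_total n.toNat n 0 (by omega) (by omega)
    rw [eq_comm, PySem.Int.floordiv_eq_iff_of_pos (by omega)]
    constructor <;> omega
  · have hle : n ≤ 0 := by omega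
    have : PySem.List.pyRange 0 n 1 = [] := by
      have := PySem.List.length_pyRange_one (a := 0) (b := n)
      have hlt : (n - 0).toNat = 0 := by omega
      exact List.eq_nil_of_length_eq_zero (by rw [this]; simpa using hlt)
    simp [this, hn]
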